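-- pv_equiv track=rewrite | github.com/ClaireCJS/fix_wrong_image_extensions | fix_wrong_image_extensions.py | remove_duplicate_extension_ALMOST_PERFECT
-- ===== SOURCE A (Python) =====
-- def remove_duplicate_extension_ALMOST_PERFECT(filename, image_type=None, testing=False):
--     known_image_extensions = ["jpg", "jpeg", "gif", "png", "bmp", "webp", "ico", "tif", "tiff", "pcx", "art", "dcm", "jfif", "jpg_large", "png_large"]
--
--     name_parts = filename.split('.')
--     if len(name_parts) < 2:
--         # Filename has no extension
--         if image_type:
--             name_parts.append(image_type.lower())
--         return '.'.join(name_parts)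
--
--     main_part = name_parts[0]
--     extensions = name_parts[1:]
--
--     # Remove the duplicate and incorrect extensions
--     seen = []
--     for ext in extensions:
--         if ext.lower() in seen:
--             continue
--         # Check if image type is specified and remove any non-matching known image extensions
--         if image_type and ext.lower() in known_image_extensions:
--             if ext.lower() == image_type.lower() and image_type.lower() not in seen:
--                 seen.append(ext.lower())
--             continue
--         seen.append(ext.lower())
--
--     # If image type is specified, ensure it is the last extension if present
--     if image_type:
--         if image_type.lower() not in seen:
--             seen.append(image_type.lower())
--         else:
--             seen.remove(image_type.lower())
--             seen.append(image_type.lower())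
--
--     return '.'.join([main_part] + seen)
-- ===== SOURCE B (Python) =====
-- def remove_duplicate_extension_ALMOST_PERFECT(filename, image_type=None, testing=False):
--     known_image_extensions = ["jpg", "jpeg", "gif", "png", "bmp", "webp", "ico", "tif", "tiff", "pcx", "art", "dcm", "jfif", "jpg_large", "png_large"]
--     parts = filename.split('.')
--     it = image_type.lower() if image_type else None
--     if len(parts) < 2:
--         return '.'.join(parts + ([it] if it is not None else []))
--     # head-filter dedup: take the first remaining extension, delete every later
--     # occurrence of it from the remainder, and decide whether to keep the head.
--     kept = []
--     rest = parts[1:]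
--     while rest:
--         h = rest[0].lower()
--         rest = [e for e in rest[1:] if e.lower() != h]
--         if not (it is not None and h in known_image_extensions and h != it):
--             kept.append(h)
--     if it is None:
--         return '.'.join([parts[0]] + kept)
--     return '.'.join([parts[0]] + [e for e in kept if e != it] + [it])
-- ===== Notes on version B (the rewrite author's own statement) =====
-- stated objective: alternative
-- what changed: A's forward scan with a growing seen-list (membership tests plus a remove-then-append fixup) is replaced by head-filter deduplication: repeatedly take the first remaining extension, delete all its later occurrences from the remainder by filtering, decide once whether the head survives, then move image_type last by a comprehension; no seen structure or membership test against the output exists.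
import Mathlib
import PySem

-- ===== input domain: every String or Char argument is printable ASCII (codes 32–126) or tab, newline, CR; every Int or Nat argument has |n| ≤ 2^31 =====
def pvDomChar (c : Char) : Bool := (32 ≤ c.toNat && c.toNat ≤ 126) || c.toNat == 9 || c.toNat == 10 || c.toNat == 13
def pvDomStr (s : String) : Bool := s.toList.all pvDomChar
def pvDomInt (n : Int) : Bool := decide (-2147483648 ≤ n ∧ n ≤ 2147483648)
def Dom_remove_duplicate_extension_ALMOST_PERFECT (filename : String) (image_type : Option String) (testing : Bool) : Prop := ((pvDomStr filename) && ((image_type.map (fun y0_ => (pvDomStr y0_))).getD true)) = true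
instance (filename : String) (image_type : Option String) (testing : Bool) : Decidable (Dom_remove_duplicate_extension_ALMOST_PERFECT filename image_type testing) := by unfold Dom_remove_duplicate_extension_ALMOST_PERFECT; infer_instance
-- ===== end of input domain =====

-- B replaces A's seen-list scan by head-filter deduplication (take head, filter its later duplicates out of the remainder) plus a move-last comprehension; objective: alternative decomposition, same cost.

-- ===== PORT A =====
def pvKnown : List String := ["jpg", "jpeg", "gif", "png", "bmp", "webp", "ico", "tif", "tiff", "pcx", "art", "dcm", "jfif", "jpg_large", "png_large"]

def remove_duplicate_extension_ALMOST_PERFECT (filename : String) (image_type : Option String) (testing : Bool) : String :=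
  let name_parts := (PySem.Str.split? filename ".").getD []   -- sep "." is nonempty, split? is always 'some' here
  if name_parts.length < 2 then
    -- 'if image_type:' — truthy iff some nonempty string
    match image_type with
    | some s => if s = "" then PySem.Str.join "." name_parts
                else PySem.Str.join "." (name_parts ++ [PySem.Str.lower s])
    | none => PySem.Str.join "." name_parts
  else
    let main_part := name_parts.headD ""   -- name_parts[0]; split? never returns [], so headD is exact
    let extensions := name_parts.tail
    let seen := extensions.foldl (fun seen ext =>
      if PySem.Str.lower ext ∈ seen then seen
      else
        match image_type with
        | some s =>
          if ¬ s = "" ∧ PySem.Str.lower ext ∈ pvKnown then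
            (if PySem.Str.lower ext = PySem.Str.lower s ∧ PySem.Str.lower s ∉ seen
             then seen ++ [PySem.Str.lower ext] else seen)
          else seen ++ [PySem.Str.lower ext]
        | none => seen ++ [PySem.Str.lower ext]) []
    let seen := match image_type with
      | some s =>
        if s = "" then seen
        else if PySem.Str.lower s ∉ seen then seen ++ [PySem.Str.lower s]
        else ((PySem.List.remove? seen (PySem.Str.lower s)).getD seen) ++ [PySem.Str.lower s]
          -- seen.remove: guarded by the membership test, remove? is always 'some' here
      | none => seen
    PySem.Str.join "." (main_part :: seen)

-- ===== PORT B =====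
-- Source B's while loop: state (kept, rest); each step lowers the head, filters its
-- duplicates out of the remainder, and appends the head to kept unless dropped.
def pvKeep (it : Option String) (kept : List String) (rest : List String) : List String :=
  match rest with
  | [] => kept
  | x :: xs =>
    let h := PySem.Str.lower x
    let rest' := xs.filter (fun e => !(PySem.Str.lower e == h))
    match it with
    | some t => if h ∈ pvKnown ∧ ¬ h = t then pvKeep it kept rest'
                else pvKeep it (kept ++ [h]) rest'
    | none => pvKeep it (kept ++ [h]) rest'
termination_by rest.length
decreasing_by all_goals
  simp only [List.length_cons, Nat.lt_succ_iff, List.length_unattach]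
  exact le_trans (List.length_filter_le _ _) (by simp)

def remove_duplicate_extension_ALMOST_PERFECT_alt (filename : String) (image_type : Option String) (testing : Bool) : String :=
  let parts := (PySem.Str.split? filename ".").getD []   -- sep "." is nonempty, split? is always 'some' here
  let it : Option String := match image_type with
    | some s => if s = "" then none else some (PySem.Str.lower s)
    | none => none
  if parts.length < 2 then
    PySem.Str.join "." (parts ++ (match it with | some t => [t] | none => []))
  else
    let kept := pvKeep it [] parts.tail
    match it with
    | none => PySem.Str.join "." (parts.headD "" :: kept)
    | some t => PySem.Str.join "." (parts.headD "" :: (kept.filter (fun e => ¬ e = t) ++ [t]))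

-- ===== PRECONDITION & SPEC =====
def Spec_remove_duplicate_extension_ALMOST_PERFECT (filename : String) (image_type : Option String) (testing : Bool) (out : String) : Prop := out = remove_duplicate_extension_ALMOST_PERFECT_alt filename image_type testing
instance (filename : String) (image_type : Option String) (testing : Bool) (out : String) : Decidable (Spec_remove_duplicate_extension_ALMOST_PERFECT filename image_type testing out) := by unfold Spec_remove_duplicate_extension_ALMOST_PERFECT; infer_instance

-- ===== CLAIM (what is proved, stated in full; the proofs are below) =====
def Claim_equal_remove_duplicate_extension_ALMOST_PERFECT : Prop := ∀ (filename : String) (image_type : Option String) (testing : Bool), Dom_remove_duplicate_extension_ALMOST_PERFECT filename image_type testing → Spec_remove_duplicate_extension_ALMOST_PERFECT filename image_type testing (remove_duplicate_extension_ALMOST_PERFECT filename image_type testing)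

-- ===== LEMMAS AND PROOFS =====

-- first-occurrence dedup commutes with filter
theorem pv_dedup_filter (p : String → Bool) (l : List String) :
    PySem.List.dedup (l.filter p) = (PySem.List.dedup l).filter p := by
  induction l with
  | nil => rfl
  | cons x l ih =>
    simp only [PySem.List.dedup_eq_ofList] at *
    by_cases hp : p x = true
    · rw [List.filter_cons_of_pos hp, PySem.Set.ofList_cons, PySem.Set.ofList_cons,
        List.filter_cons_of_pos hp]
      simp only [PySem.Set.discard]
      rw [ih, List.filter_filter, List.filter_filter]
      congr 1
      apply List.filter_congr
      intro y _
      cases h : (y == x) <;> simp [h]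
    · rw [List.filter_cons_of_neg hp, PySem.Set.ofList_cons]
      simp only [PySem.Set.discard]
      rw [List.filter_cons_of_neg hp, ih, List.filter_filter]
      apply List.filter_congr
      intro y _
      by_cases hyx : y = x
      · subst hyx
        simp [Bool.eq_false_iff.mpr hp]
      · simp [hyx]

-- dedup of a cons: head, then dedup of the tail with the head's duplicates filtered out
theorem pv_dedup_cons (a : String) (l : List String) :
    PySem.List.dedup (a :: l) = a :: PySem.List.dedup (l.filter (fun y => !(y == a))) := by
  rw [pv_dedup_filter]
  simp only [PySem.List.dedup_eq_ofList, PySem.Set.ofList_cons]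
  rfl

-- B's loop with a falsy image_type computes kept ++ dedup of the lowered extensions
theorem pv_keep_none : ∀ (n : Nat) (rest kept : List String), rest.length ≤ n →
    pvKeep none kept rest = kept ++ PySem.List.dedup (rest.map PySem.Str.lower) := by
  intro n
  induction n with
  | zero =>
    intro rest kept h
    have : rest = [] := List.eq_nil_of_length_eq_zero (Nat.le_zero.mp h)
    subst this; simp [pvKeep]
  | succ n ih =>
    intro rest kept h
    match rest with
    | [] => rw [pvKeep]; simp
    | x :: xs =>
      rw [pvKeep]
      rw [ih _ _ (by simpa using Nat.le_trans (List.length_filter_le _ _) (Nat.succ_le_succ_iff.mp h))]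
      rw [List.map_cons, pv_dedup_cons]
      have : (xs.map PySem.Str.lower).filter (fun y => !(y == PySem.Str.lower x))
          = (xs.filter (fun e => !(PySem.Str.lower e == PySem.Str.lower x))).map PySem.Str.lower := by
        rw [List.filter_map]; rfl
      rw [this]
      simp

-- B's loop with a truthy image_type computes kept ++ the filtered dedup
theorem pv_keep_some (t : String) : ∀ (n : Nat) (rest kept : List String), rest.length ≤ n →
    pvKeep (some t) kept rest =
      kept ++ (PySem.List.dedup (rest.map PySem.Str.lower)).filter
        (fun e => decide (e ∉ pvKnown ∨ e = t)) := by
  intro n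
  induction n with
  | zero =>
    intro rest kept h
    have : rest = [] := List.eq_nil_of_length_eq_zero (Nat.le_zero.mp h)
    subst this; simp [pvKeep]
  | succ n ih =>
    intro rest kept h
    match rest with
    | [] => rw [pvKeep]; simp
    | x :: xs =>
      rw [pvKeep]
      rw [List.map_cons, pv_dedup_cons]
      have hmf : (xs.map PySem.Str.lower).filter (fun y => !(y == PySem.Str.lower x))
          = (xs.filter (fun e => !(PySem.Str.lower e == PySem.Str.lower x))).map PySem.Str.lower := by
        rw [List.filter_map]; rfl
      rw [hmf]
      have hlen : (xs.filter (fun e => !(PySem.Str.lower e == PySem.Str.lower x))).length ≤ n :=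
        Nat.le_trans (List.length_filter_le _ _) (Nat.succ_le_succ_iff.mp h)
      by_cases hd : PySem.Str.lower x ∈ pvKnown ∧ ¬ PySem.Str.lower x = t
      · rw [if_pos hd, ih _ _ hlen, List.filter_cons_of_neg (by simp; tauto)]
      · rw [if_neg hd, ih _ _ hlen, List.filter_cons_of_pos (by simp; tauto)]
        simp

-- A's loop state (over already-lowered elements) equals 'filter p' of the dedup fold state.
theorem pv_fold_filter (t : String) (l : List String) (u : List String) :
    l.foldl (fun seen e =>
      if e ∈ seen then seen
      else if e ∈ pvKnown ∧ ¬ e = t then seen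
      else seen ++ [e]) (u.filter (fun e => decide (e ∉ pvKnown ∨ e = t))) =
    (l.foldl PySem.Set.add u).filter (fun e => decide (e ∉ pvKnown ∨ e = t)) := by
  induction l generalizing u with
  | nil => rfl
  | cons e l ih =>
    simp only [List.foldl_cons, PySem.Set.add_eq_ite]
    by_cases hu : e ∈ u
    · by_cases hp : e ∉ pvKnown ∨ e = t
      · have : e ∈ u.filter (fun e => decide (e ∉ pvKnown ∨ e = t)) := by
          simp [List.mem_filter, hu, hp]
        rw [if_pos this, if_pos hu]; exact ih u
      · have hne : e ∉ u.filter (fun e => decide (e ∉ pvKnown ∨ e = t)) := by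
          simp only [List.mem_filter, decide_eq_true_eq]; tauto
        have hkt : e ∈ pvKnown ∧ ¬ e = t := by tauto
        rw [if_neg hne, if_pos hkt, if_pos hu]; exact ih u
    · have hne : e ∉ u.filter (fun e => decide (e ∉ pvKnown ∨ e = t)) := by
        simp only [List.mem_filter]; tauto
      rw [if_neg hne, if_neg hu]
      by_cases hp : e ∉ pvKnown ∨ e = t
      · have hkt : ¬ (e ∈ pvKnown ∧ ¬ e = t) := by tauto
        rw [if_neg hkt]
        have : u.filter (fun e => decide (e ∉ pvKnown ∨ e = t)) ++ [e]
            = (u ++ [e]).filter (fun e => decide (e ∉ pvKnown ∨ e = t)) := by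
          simp [List.filter_append, hp]
        rw [this]; exact ih (u ++ [e])
      · have hkt : e ∈ pvKnown ∧ ¬ e = t := by tauto
        rw [if_pos hkt]
        have : u.filter (fun e => decide (e ∉ pvKnown ∨ e = t))
            = (u ++ [e]).filter (fun e => decide (e ∉ pvKnown ∨ e = t)) := by
          simp [List.filter_append, hp]
        rw [this]; exact ih (u ++ [e])

-- A's loop with a falsy image_type is the plain order-preserving dedup of the lowered extensions
theorem pv_fold_dedup (l : List String) :
    l.foldl (fun seen ext =>
      if PySem.Str.lower ext ∈ seen then seen else seen ++ [PySem.Str.lower ext]) [] =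
    PySem.List.dedup (l.map PySem.Str.lower) := by
  rw [PySem.List.dedup_eq_ofList, PySem.Set.ofList_eq_foldl, List.foldl_map]
  congr 1
  funext seen e
  rw [PySem.Set.add_eq_ite]

-- A's loop with a truthy image_type, as filter-after-dedup (t = image_type.lower())
theorem pv_A_fold (s : String) (hs : ¬ s = "") (l : List String) :
    l.foldl (fun seen ext =>
      if PySem.Str.lower ext ∈ seen then seen
      else
        if ¬ s = "" ∧ PySem.Str.lower ext ∈ pvKnown then
          (if PySem.Str.lower ext = PySem.Str.lower s ∧ PySem.Str.lower s ∉ seen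
           then seen ++ [PySem.Str.lower ext] else seen)
        else seen ++ [PySem.Str.lower ext]) [] =
    (PySem.List.dedup (l.map PySem.Str.lower)).filter
      (fun e => decide (e ∉ pvKnown ∨ e = PySem.Str.lower s)) := by
  have h1 : l.foldl (fun seen ext =>
      if PySem.Str.lower ext ∈ seen then seen
      else
        if ¬ s = "" ∧ PySem.Str.lower ext ∈ pvKnown then
          (if PySem.Str.lower ext = PySem.Str.lower s ∧ PySem.Str.lower s ∉ seen
           then seen ++ [PySem.Str.lower ext] else seen)
        else seen ++ [PySem.Str.lower ext]) [] =
      (l.map PySem.Str.lower).foldl (fun seen e =>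
      if e ∈ seen then seen
      else if e ∈ pvKnown ∧ ¬ e = PySem.Str.lower s then seen
      else seen ++ [e]) [] := by
    rw [List.foldl_map]
    congr 1
    funext seen e
    by_cases hin : PySem.Str.lower e ∈ seen
    · rw [if_pos hin, if_pos hin]
    · rw [if_neg hin, if_neg hin]
      by_cases hk : PySem.Str.lower e ∈ pvKnown
      · rw [if_pos ⟨hs, hk⟩]
        by_cases het : PySem.Str.lower e = PySem.Str.lower s
        · rw [if_pos ⟨het, het ▸ hin⟩, if_neg (by tauto)]
        · rw [if_neg (by tauto), if_pos ⟨hk, het⟩]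
      · rw [if_neg (by tauto), if_neg (by tauto)]
  rw [h1, PySem.List.dedup_eq_ofList, PySem.Set.ofList_eq_foldl, ← pv_fold_filter]
  rfl

-- move-to-last: on a Nodup list, remove-first + append = filter-out + append
theorem pv_move_last (t : String) (s : List String) (hnd : s.Nodup) :
    (if t ∉ s then s ++ [t]
     else ((PySem.List.remove? s t).getD s) ++ [t]) =
    s.filter (fun e => decide (¬ e = t)) ++ [t] := by
  by_cases h : t ∈ s
  · rw [if_neg (by simpa using h), PySem.List.remove?_eq_some_erase s t h]
    simp only [Option.getD_some]
    congr 1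
    rw [List.Nodup.erase_eq_filter hnd t]
    congr 1
    funext x
    by_cases hx : x = t <;> simp [hx]
  · rw [if_pos h]
    congr 1
    symm
    rw [List.filter_eq_self]
    intro a ha
    simp only [decide_eq_true_eq]
    rintro rfl; exact h ha

theorem pv_nodup_filter_dedup (l : List String) (p : String → Bool) :
    ((PySem.List.dedup l).filter p).Nodup :=
  List.Nodup.filter p (PySem.List.nodup_dedup l)

-- ===== VERDICT (by name: the statement is the Claim_ definition above) =====
theorem remove_duplicate_extension_ALMOST_PERFECT_spec : Claim_equal_remove_duplicate_extension_ALMOST_PERFECT := by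
  intro filename image_type testing _
  unfold Spec_remove_duplicate_extension_ALMOST_PERFECT
  unfold remove_duplicate_extension_ALMOST_PERFECT remove_duplicate_extension_ALMOST_PERFECT_alt
  simp only []
  by_cases hlen : ((PySem.Str.split? filename ".").getD []).length < 2
  · cases image_type with
    | none => simp only [hlen, if_pos, List.append_nil]
    | some s =>
      by_cases hs : s = ""
      · simp only [hlen, if_pos, hs, List.append_nil]
      · simp only [hlen, if_pos, if_neg hs]
  · cases image_type with
    | none =>
      simp only [hlen, ite_false, pv_fold_dedup,
        pv_keep_none ((PySem.Str.split? filename ".").getD []).tail.length _ _ (Nat.le_refl _),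
        List.nil_append]
    | some s =>
      by_cases hs : s = ""
      · subst hs
        simp only [hlen, ite_false, not_true_eq_false, false_and, if_true]
        rw [pv_fold_dedup,
          pv_keep_none ((PySem.Str.split? filename ".").getD []).tail.length _ _ (Nat.le_refl _),
          List.nil_append]
      · simp only [hlen, ite_false, if_neg hs, pv_A_fold s hs,
          pv_keep_some (PySem.Str.lower s) ((PySem.Str.split? filename ".").getD []).tail.length _ _ (Nat.le_refl _),
          List.nil_append]
        rw [pv_move_last (PySem.Str.lower s) _ (pv_nodup_filter_dedup _ _)]
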